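-- pv_equiv track=rewrite | github.com/wenting-wang/sst-hdbm-mac | utils/trend_local_order.py | extract_streaks
-- ===== SOURCE A (Python) =====
-- def extract_streaks(is_go_array, rt_array):
--     """ Extracts streaks of continuous Go trials that occur AFTER a Stop trial. """
--     streaks = []
--     current_streak = []
--     seen_first_stop = False
--
--     for go_flag, rt in zip(is_go_array, rt_array):
--         if not go_flag: # Stop Trial
--             seen_first_stop = True
--             if len(current_streak) > 0:
--                 streaks.append(current_streak)
--                 current_streak = []
--         else: # Go Trial
--             if seen_first_stop:
--                 current_streak.append(rt)
--
--     if len(current_streak) > 0: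
--         streaks.append(current_streak)
--
--     return streaks
-- ===== SOURCE B (Python) =====
-- from itertools import dropwhile, groupby
--
--
-- def extract_streaks(is_go_array, rt_array):
--     """ Extracts streaks of continuous Go trials that occur AFTER a Stop trial. """
--     tail = dropwhile(lambda p: p[0], zip(is_go_array, rt_array))
--     return [[rt for _, rt in run]
--             for go, run in groupby(tail, key=lambda p: bool(p[0])) if go]
-- ===== Notes on version B (the rewrite author's own statement) =====
-- stated objective: idiomatic
-- what changed: Replaces the explicit current_streak/seen_first_stop state machine by dropwhile to skip everything before the first Stop trial and itertools.groupby to cut the rest into maximal runs, keeping the Go runs.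
import Mathlib
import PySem

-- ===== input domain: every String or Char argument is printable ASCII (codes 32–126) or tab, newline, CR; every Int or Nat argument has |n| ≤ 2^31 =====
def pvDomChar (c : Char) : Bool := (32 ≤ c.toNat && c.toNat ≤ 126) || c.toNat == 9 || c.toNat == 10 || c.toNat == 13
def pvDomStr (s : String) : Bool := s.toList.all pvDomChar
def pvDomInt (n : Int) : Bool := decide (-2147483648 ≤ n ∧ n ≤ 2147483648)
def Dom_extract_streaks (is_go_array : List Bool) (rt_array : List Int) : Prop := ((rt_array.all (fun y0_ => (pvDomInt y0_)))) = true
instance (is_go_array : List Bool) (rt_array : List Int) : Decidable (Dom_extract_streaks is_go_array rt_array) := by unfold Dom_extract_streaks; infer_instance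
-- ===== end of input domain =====

-- B replaces A's explicit current_streak/seen_first_stop state machine by dropwhile
-- (skip everything before the first Stop trial) + groupby (maximal runs), keeping Go runs;
-- objective: idiomatic. Return values only (A mutates no arguments).

-- ===== PORT A =====
-- one step of A's for-loop over zip(is_go_array, rt_array); state = (streaks, current_streak, seen_first_stop)
def pvStepA (st : List (List Int) × List Int × Bool) (pr : Bool × Int) :
    List (List Int) × List Int × Bool :=
  match st, pr with
  | (streaks, current, seen), (go, rt) =>
    if !go then
      -- Stop trial: seen_first_stop = True; flush current_streak if non-empty
      if current.length > 0 then (streaks ++ [current], [], true) else (streaks, current, true)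
    else
      -- Go trial
      if seen then (streaks, current ++ [rt], seen) else (streaks, current, seen)

def extract_streaks (is_go_array : List Bool) (rt_array : List Int) : List (List Int) :=
  match (is_go_array.zip rt_array).foldl pvStepA ([], [], false) with
  | (streaks, current, _) => if current.length > 0 then streaks ++ [current] else streaks

-- ===== PORT B =====
-- itertools.groupby: maximal runs of equal key (here the Bool flag), values in order
def pvGroups : List (Bool × Int) → List (Bool × List Int)
  | [] => []
  | (g, r) :: rest =>
      (g, r :: (rest.takeWhile (fun p => p.1 == g)).map Prod.snd)
        :: pvGroups (rest.dropWhile (fun p => p.1 == g))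
termination_by l => l.length
decreasing_by
  simp only [List.length_cons]
  exact Nat.lt_succ_of_le (List.length_dropWhile_le _ _)

def extract_streaks_alt (is_go_array : List Bool) (rt_array : List Int) : List (List Int) :=
  let tail := (is_go_array.zip rt_array).dropWhile (fun p => p.1)
  (pvGroups tail).filterMap (fun gr => if gr.1 then some gr.2 else none)

-- ===== PRECONDITION & SPEC =====
def Spec_extract_streaks (is_go_array : List Bool) (rt_array : List Int) (out : List (List Int)) : Prop := out = extract_streaks_alt is_go_array rt_array
instance (is_go_array : List Bool) (rt_array : List Int) (out : List (List Int)) : Decidable (Spec_extract_streaks is_go_array rt_array out) := by unfold Spec_extract_streaks; infer_instance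

-- ===== CLAIM (what is proved, stated in full; the proofs are below) =====
def Claim_equal_extract_streaks : Prop := ∀ (is_go_array : List Bool) (rt_array : List Int), Dom_extract_streaks is_go_array rt_array → Spec_extract_streaks is_go_array rt_array (extract_streaks is_go_array rt_array)

-- ===== LEMMAS AND PROOFS =====

-- reference description of A's post-first-stop behaviour: current streak c, remaining pairs
def pvFinTail : List Int → List (Bool × Int) → List (List Int)
  | c, [] => if c.length > 0 then [c] else []
  | c, (g, r) :: rs =>
      if g then pvFinTail (c ++ [r]) rs
      else (if c.length > 0 then [c] else []) ++ pvFinTail [] rs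

def pvFinalize (st : List (List Int) × List Int × Bool) : List (List Int) :=
  if st.2.1.length > 0 then st.1 ++ [st.2.1] else st.1

theorem pvFoldA_char (rest : List (Bool × Int)) :
    ∀ (S : List (List Int)) (C : List Int),
      pvFinalize (rest.foldl pvStepA (S, C, true)) = S ++ pvFinTail C rest := by
  induction rest with
  | nil =>
      intro S C
      simp only [List.foldl_nil, pvFinalize, pvFinTail]
      split <;> simp
  | cons p rs ih =>
      intro S C
      obtain ⟨g, r⟩ := p
      cases g with
      | true =>
          simp only [List.foldl_cons, pvStepA, Bool.not_true, if_true, pvFinTail]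
          simpa using ih S (C ++ [r])
      | false =>
          by_cases h : C.length > 0
          · simp [pvStepA, pvFinTail, h, ih]
          · have hC : C = [] := by simpa using h
            simp [pvStepA, pvFinTail, hC, ih]

theorem pvFoldA_full (pairs : List (Bool × Int)) :
    pvFinalize (pairs.foldl pvStepA ([], [], false)) =
      pvFinTail [] (pairs.dropWhile (fun p => p.1)) := by
  induction pairs with
  | nil => simp [pvFinalize, pvFinTail]
  | cons p rs ih =>
      obtain ⟨g, r⟩ := p
      cases g with
      | true =>
          simpa [pvStepA, List.dropWhile] using ih
      | false =>
          simp only [List.foldl_cons, pvStepA, Bool.not_false, List.length_nil, gt_iff_lt,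
            Nat.lt_irrefl, if_false, List.dropWhile, pvFinTail]
          simpa using pvFoldA_char rs [] []

-- a non-empty current streak absorbs the leading Go run, then flushes
theorem pvFinTail_run (rs : List (Bool × Int)) :
    ∀ (C : List Int), C.length > 0 →
      pvFinTail C rs =
        (C ++ (rs.takeWhile (fun p => p.1 == true)).map Prod.snd)
          :: pvFinTail [] (rs.dropWhile (fun p => p.1 == true)) := by
  induction rs with
  | nil => intro C hC; simp [pvFinTail, if_pos hC]
  | cons p rest ih =>
      intro C hC
      obtain ⟨g, r⟩ := p
      cases g with
      | true =>
          have hC' : (C ++ [r]).length > 0 := by simp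
          simp only [pvFinTail, List.takeWhile, List.dropWhile, beq_self_eq_true,
            List.map_cons, ih (C ++ [r]) hC']
          simp
      | false =>
          simp [pvFinTail, List.takeWhile, List.dropWhile, if_pos hC]

-- with empty current streak, leading Stop trials contribute nothing
theorem pvFinTail_skip_false (rs : List (Bool × Int)) :
    pvFinTail [] (rs.dropWhile (fun p => p.1 == false)) = pvFinTail [] rs := by
  induction rs with
  | nil => rfl
  | cons p rest ih =>
      obtain ⟨g, r⟩ := p
      cases g with
      | true => simp [List.dropWhile]
      | false =>
          have h1 : pvFinTail ([] : List Int) ((false, r) :: rest) = pvFinTail [] rest := by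
            simp [pvFinTail]
          rw [h1, List.dropWhile_cons]
          simpa using ih

theorem pvFinTail_groups (n : ℕ) :
    ∀ (rs : List (Bool × Int)), rs.length ≤ n →
      pvFinTail [] rs =
        (pvGroups rs).filterMap (fun gr => if gr.1 then some gr.2 else none) := by
  induction n with
  | zero =>
      intro rs h
      have : rs = [] := List.eq_nil_of_length_eq_zero (Nat.le_zero.mp h)
      simp [this, pvFinTail, pvGroups]
  | succ n ih =>
      intro rs h
      match rs with
      | [] => simp [pvFinTail, pvGroups]
      | (g, r) :: rest =>
          have hlen : rest.length ≤ n := by simpa using h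
          cases g with
          | true =>
              rw [pvGroups]
              simp only [List.filterMap_cons]
              have hd : (rest.dropWhile (fun p => p.1 == true)).length ≤ n :=
                le_trans (List.length_dropWhile_le _ _) hlen
              have := pvFinTail_run rest [r] (by simp)
              simp only [pvFinTail, List.nil_append] at this ⊢
              rw [this, ih _ hd]
              simp
          | false =>
              rw [pvGroups]
              simp only [List.filterMap_cons, if_neg (by simp : ¬ (false = true))]
              have hd : (rest.dropWhile (fun p => p.1 == false)).length ≤ n :=
                le_trans (List.length_dropWhile_le _ _) hlen
              have h1 : pvFinTail ([] : List Int) ((false, r) :: rest) = pvFinTail [] rest := by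
                simp [pvFinTail]
              rw [h1, ← pvFinTail_skip_false rest, ih _ hd]

-- ===== VERDICT (by name: the statement is the Claim_ definition above) =====
theorem extract_streaks_spec : Claim_equal_extract_streaks := by
  intro is_go rt _
  show extract_streaks is_go rt = extract_streaks_alt is_go rt
  have hA : extract_streaks is_go rt =
      pvFinalize ((is_go.zip rt).foldl pvStepA ([], [], false)) := by
    unfold extract_streaks pvFinalize
    rcases (is_go.zip rt).foldl pvStepA ([], [], false) with ⟨s, c, b⟩
    rfl
  rw [hA, pvFoldA_full, pvFinTail_groups ((is_go.zip rt).dropWhile (fun p => p.1)).length _ le_rfl]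
  rfl
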